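-- pv_equiv track=rewrite | github.com/24127250-PhanQuangTien/FreeCell | game.py | generate_ms_deck_original
-- ===== SOURCE A (Python) =====
-- def ms_rand_c(seed: int) -> tuple[int, int]:
--     """
--     Đây là rand() của Microsoft C runtime (MSVC)
--     seed = (seed * 214013 + 2531011) & 0xFFFFFFFF
--     return = (seed >> 16) & 0x7FFF  → 15-bit number
--     """
--     seed = (seed * 214013 + 2531011) & 0xFFFFFFFF
--     return seed, (seed >> 16) & 0x7FFF
--
-- def generate_ms_deck_original(gamenumber: int):
--     """
--     Dịch 1-1 từ C gốc của Microsoft FreeCell.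
--
--     C gốc:
--         srand(gamenumber);
--         for (i = 0; i < 52; i++) {
--             j = rand() % wLeft;
--             card[(i%8)+1][i/8] = deck[j];
--             deck[j] = deck[--wLeft];
--         }
--     """
--     MAXCOL = 9   # col 0 bỏ trống, dùng col 1-8
--     MAXPOS = 21
--     EMPTY  = -1
--
--     # Khởi tạo bảng bài (giống C: card[MAXCOL][MAXPOS])
--     card = [[EMPTY] * MAXPOS for _ in range(MAXCOL)]
--
--     # Khởi tạo deck 52 lá
--     deck  = list(range(52))
--     wLeft = 52
--     seed  = gamenumber
--
--     for i in range(52):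
--         seed, r = ms_rand_c(seed)
--         j = r % wLeft                        # j = rand() % wLeft
--         card[(i % 8) + 1][i // 8] = deck[j] # card[(i%8)+1][i/8] = deck[j]
--         deck[j] = deck[wLeft - 1]            # deck[j] = deck[--wLeft]
--         wLeft -= 1
--
--     return card
-- ===== SOURCE B (Python) =====
-- def generate_ms_deck_original(gamenumber):
--     # Pass 1: precompute the 52 MSVC-rand draw indices j_i = rand() % wLeft.
--     js = []
--     seed = gamenumber
--     for i in range(52):
--         seed = (seed * 214013 + 2531011) & 0xFFFFFFFF
--         js.append(((seed >> 16) & 0x7FFF) % (52 - i))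
--     # Pass 2: no deck array at all.  The card drawn at step i is the content of
--     # slot js[i] just before step i; a swap at an earlier step t moved the card
--     # of slot 51 - t into slot js[t].  Chase that chain of swaps backwards:
--     def slot_value(t, s):
--         while t > 0:
--             t -= 1
--             if js[t] == s:
--                 s = 51 - t
--         return s
--     dealt = [slot_value(i, js[i]) for i in range(52)]
--     # Pass 3: place the dealt cards into the 9 x 21 table.
--     card = [[-1] * 21 for _ in range(9)]
--     for i, v in enumerate(dealt):
--         card[i % 8 + 1][i // 8] = v
--     return card
-- ===== Notes on version B (the rewrite author's own statement) =====
-- stated objective: alternative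
-- what changed: B eliminates the mutable deck array entirely: it precomputes all MSVC-rand draw indices up front, then recovers each dealt card by chasing the chain of swap-with-last relocations backwards through that index list, and fills the table in a separate final pass.
import Mathlib
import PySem

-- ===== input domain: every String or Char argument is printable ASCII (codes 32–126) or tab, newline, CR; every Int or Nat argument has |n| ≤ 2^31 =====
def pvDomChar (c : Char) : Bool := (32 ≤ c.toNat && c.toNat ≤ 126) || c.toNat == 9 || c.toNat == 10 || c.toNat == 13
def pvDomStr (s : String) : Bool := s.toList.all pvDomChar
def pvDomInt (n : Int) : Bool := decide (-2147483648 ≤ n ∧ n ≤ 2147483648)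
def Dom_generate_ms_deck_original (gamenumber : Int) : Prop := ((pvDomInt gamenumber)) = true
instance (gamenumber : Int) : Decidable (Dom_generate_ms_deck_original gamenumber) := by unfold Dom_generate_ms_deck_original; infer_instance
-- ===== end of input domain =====

-- B removes A's mutable deck array: it precomputes the 52 draw indices, recovers each dealt
-- card by chasing the swap-with-last relocations backwards through that index list, and fills
-- the table in a separate pass; objective: alternative algorithm (same result, similar cost).

-- ===== PORT A =====
-- 'x & 0xFFFFFFFF' is ported as Python-mod by 2^32 (exact identity for any Python int);
-- '>> 16' is Int's arithmetic shift '>>> 16' (exact, per PySem notes).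
def ms_rand_c (seed : Int) : Int × Int :=
  let seed := PySem.Int.mod (seed * 214013 + 2531011) 4294967296
  (seed, PySem.Int.mod (seed >>> (16 : Nat)) 32768)

-- body of A's 'for i in range(52)' loop; state = (card, deck, wLeft, seed)
def msStepA (st : List (List Int) × List Int × Int × Int) (i : Int) :
    List (List Int) × List Int × Int × Int :=
  let (card, deck, wLeft, seed) := st
  let (seed, r) := ms_rand_c seed
  let j := PySem.Int.mod r wLeft
  -- card[(i%8)+1][i//8] = deck[j]  (indices are provably in range; list assignment via pySetD)
  let card := PySem.List.pySetD card (PySem.Int.mod i 8 + 1)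
      (PySem.List.pySetD (PySem.List.pyGetD card (PySem.Int.mod i 8 + 1) [])
        (PySem.Int.floordiv i 8) (PySem.List.pyGetD deck j 0))
  let deck := PySem.List.pySetD deck j (PySem.List.pyGetD deck (wLeft - 1) 0)
  (card, deck, wLeft - 1, seed)

def generate_ms_deck_original (gamenumber : Int) : List (List Int) :=
  let card := List.replicate 9 (List.replicate 21 (-1 : Int))
  let deck := PySem.List.pyRange 0 52 1
  ((PySem.List.pyRange 0 52 1).foldl msStepA (card, deck, 52, gamenumber)).1

-- ===== PORT B =====
-- Source B pass 1: 'js.append(((seed >> 16) & 0x7FFF) % (52 - i))' with the inline LCG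
def msJsStep (st : Int × List Int) (i : Int) : Int × List Int :=
  let seed := PySem.Int.mod (st.1 * 214013 + 2531011) 4294967296
  (seed, st.2 ++ [PySem.Int.mod (PySem.Int.mod (seed >>> (16 : Nat)) 32768) (52 - i)])

def ms_js (gamenumber : Int) : List Int :=
  ((PySem.List.pyRange 0 52 1).foldl msJsStep (gamenumber, [])).2

-- Source B's 'slot_value': the while loop decrementing t, as structural recursion on t
def slotValue (js : List Int) : Nat → Int → Int
  | 0, s => s
  | t + 1, s =>
    slotValue js t (if PySem.List.pyGetD js (t : Int) 0 = s then 51 - (t : Int) else s)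

def generate_ms_deck_original_alt (gamenumber : Int) : List (List Int) :=
  let js := ms_js gamenumber
  let dealt := (PySem.List.pyRange 0 52 1).map
    (fun i => slotValue js i.toNat (PySem.List.pyGetD js i 0))
  let card := List.replicate 9 (List.replicate 21 (-1 : Int))
  (PySem.List.enumerate dealt 0).foldl (fun card iv =>
    PySem.List.pySetD card (PySem.Int.mod iv.1 8 + 1)
      (PySem.List.pySetD (PySem.List.pyGetD card (PySem.Int.mod iv.1 8 + 1) [])
        (PySem.Int.floordiv iv.1 8) iv.2)) card

-- ===== PRECONDITION & SPEC =====
def Spec_generate_ms_deck_original (gamenumber : Int) (out : List (List Int)) : Prop := out = generate_ms_deck_original_alt gamenumber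
instance (gamenumber : Int) (out : List (List Int)) : Decidable (Spec_generate_ms_deck_original gamenumber out) := by unfold Spec_generate_ms_deck_original; infer_instance

-- ===== CLAIM (what is proved, stated in full; the proofs are below) =====
def Claim_equal_generate_ms_deck_original : Prop := ∀ (gamenumber : Int), Dom_generate_ms_deck_original gamenumber → Spec_generate_ms_deck_original gamenumber (generate_ms_deck_original gamenumber)

-- ===== LEMMAS AND PROOFS =====

-- the seed after k calls of ms_rand_c, and the k-th 15-bit random value
def seedN (g : Int) : Nat → Int
  | 0 => g
  | k + 1 => PySem.Int.mod (seedN g k * 214013 + 2531011) 4294967296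

def rAt (g : Int) (k : Nat) : Int :=
  PySem.Int.mod (seedN g (k + 1) >>> (16 : Nat)) 32768

-- the draw-index list B computes, in closed form
def jsL (g : Int) : List Int :=
  (List.range 52).map (fun k => PySem.Int.mod (rAt g k) (52 - (k : Int)))

lemma ms_rand_c_seedN (g : Int) (k : Nat) :
    ms_rand_c (seedN g k) = (seedN g (k + 1), rAt g k) := by
  simp [ms_rand_c, seedN, rAt]

-- placement of a dealt list into the table, one card at a time
def placeOne (card : List (List Int)) (i : Nat) (v : Int) : List (List Int) :=
  card.set (i % 8 + 1) ((card.getD (i % 8 + 1) []).set (i / 8) v)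

def placeList : List (List Int) → Nat → List Int → List (List Int)
  | card, _, [] => card
  | card, i, v :: L => placeList (placeOne card i v) (i + 1) L

-- the sequence of cards A deals, with the full-length deck and swap-with-last updates
def drawA : Nat → List Int → Int → List Int
  | 0, _, _ => []
  | n + 1, deck, seed =>
    let p := ms_rand_c seed
    let j := (PySem.Int.mod p.2 ((n : Int) + 1)).toNat
    deck.getD j 0 :: drawA n (deck.set j (deck.getD n 0)) p.1

lemma jsL_getD (g : Int) (t : Nat) (ht : t < 52) :
    (jsL g).getD t 0 = PySem.Int.mod (rAt g t) (52 - (t : Int)) := by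
  unfold jsL
  rw [List.getD_eq_getElem _ 0 (by simp [ht]), List.getElem_map, List.getElem_range]

-- A's loop computes placeList of drawA
lemma loopA (n : Nat) : ∀ (card : List (List Int)) (dA : List Int) (seed : Int),
    n ≤ 52 → dA.length = 52 →
    ((PySem.List.pyRange ((52 - n : Nat) : Int) 52 1).foldl msStepA (card, dA, (n : Int), seed)).1
      = placeList card (52 - n) (drawA n dA seed) := by
  induction n with
  | zero =>
    intro card dA seed _ _
    rw [PySem.List.pyRange_one_eq_nil (by norm_num)]
    simp [drawA, placeList]
  | succ n ih =>
    intro card dA seed hn hlen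
    have hicast : ((52 - (n+1) : Nat) : Int) < 52 := by omega
    rw [PySem.List.pyRange_one_cons hicast, List.foldl_cons]
    have hsucc : ((52 - (n+1) : Nat) : Int) + 1 = ((52 - n : Nat) : Int) := by omega
    rw [hsucc]
    set r := (ms_rand_c seed).2 with hr
    set seed' := (ms_rand_c seed).1 with hseed'
    have hms : ms_rand_c seed = (seed', r) := rfl
    have hnpos : (0:Int) < ((n:Int) + 1) := by positivity
    set j := PySem.Int.mod r ((n:Int)+1) with hj
    have hj0 : 0 ≤ j := by
      rw [hj, PySem.Int.mod_eq_emod_of_pos hnpos]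
      exact Int.emod_nonneg _ (by omega)
    have hjlt : j < (n:Int) + 1 := by
      rw [hj, PySem.Int.mod_eq_emod_of_pos hnpos]
      exact Int.emod_lt_of_pos _ hnpos
    -- A's one step
    have hstep : msStepA (card, dA, ((n+1 : Nat) : Int), seed) ((52 - (n+1) : Nat) : Int)
        = (placeOne card (52 - (n+1)) (dA.getD j.toNat 0),
           dA.set j.toNat (dA.getD n 0), (n : Int), seed') := by
      simp only [msStepA, hms]
      have h1 : ((n+1 : Nat) : Int) = (n:Int) + 1 := by omega
      rw [h1, ← hj]
      have hmod : PySem.Int.mod ((52 - (n+1) : Nat) : Int) 8 = (((52 - (n+1)) % 8 : Nat) : Int) :=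
        PySem.Int.mod_natCast _ 8
      have hdiv : PySem.Int.floordiv ((52 - (n+1) : Nat) : Int) 8 = (((52 - (n+1)) / 8 : Nat) : Int) :=
        PySem.Int.floordiv_natCast _ 8
      have hget : PySem.List.pyGetD dA j 0 = dA.getD j.toNat 0 :=
        PySem.List.pyGetD_of_nonneg dA 0 hj0
      have hgetn : PySem.List.pyGetD dA ((n:Int)+1-1) 0 = dA.getD n 0 := by
        have : ((n:Int)+1-1) = ((n:Nat):Int) := by omega
        rw [this, PySem.List.pyGetD_of_nonneg dA 0 (by omega)]
        simp
      rw [hmod, hdiv, hget, hgetn]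
      have hcol : (((52 - (n+1)) % 8 : Nat) : Int) + 1 = ((((52 - (n+1)) % 8) + 1 : Nat) : Int) := by omega
      rw [hcol]
      simp only [PySem.List.pySetD_natCast, PySem.List.pyGetD_natCast]
      have hset : PySem.List.pySetD dA j (dA.getD n 0) = dA.set j.toNat (dA.getD n 0) :=
        PySem.List.pySetD_of_nonneg dA _ hj0
      rw [hset]
      simp only [placeOne]
      norm_num
    rw [hstep]
    have hD : drawA (n+1) dA seed
        = dA.getD j.toNat 0 :: drawA n (dA.set j.toNat (dA.getD n 0)) seed' := by
      simp only [drawA, hms, ← hj]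
    rw [hD]
    show _ = placeList (placeOne card (52 - (n+1)) (dA.getD j.toNat 0)) (52 - (n+1) + 1)
        (drawA n (dA.set j.toNat (dA.getD n 0)) seed')
    have h52 : 52 - (n+1) + 1 = 52 - n := by omega
    rw [h52]
    exact ih _ _ _ (by omega) (by simp [hlen])

-- B's first pass computes exactly jsL (and chains the seed)
lemma msJs_fold (g : Int) (n : Nat) (hn : n ≤ 52) :
    (PySem.List.pyRange 0 (n : Int) 1).foldl msJsStep (g, [])
      = (seedN g n, (List.range n).map (fun k => PySem.Int.mod (rAt g k) (52 - (k : Int)))) := by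
  induction n with
  | zero =>
    rw [show ((0:Nat):Int) = 0 by norm_num, PySem.List.pyRange_zero]
    simp [seedN]
  | succ n ih =>
    have hcast : ((n+1 : Nat) : Int) = (n : Int) + 1 := by omega
    rw [hcast, PySem.List.pyRange_one_succ_right (by positivity), List.foldl_append,
      ih (by omega), List.foldl_cons, List.foldl_nil, List.range_succ, List.map_append]
    simp only [msJsStep, List.map_cons, List.map_nil]
    rfl

lemma ms_js_eq (g : Int) : ms_js g = jsL g := by
  have h := msJs_fold g 52 (le_refl _)
  norm_num at h
  unfold ms_js jsL
  rw [h]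

-- the heart of the equivalence: A's deck contents are slotValue of the index list
lemma drawA_eq (g : Int) : ∀ n, n ≤ 52 → ∀ deck : List Int, deck.length = 52 →
    (∀ s : Nat, s < 52 → deck.getD s 0 = slotValue (jsL g) (52 - n) (s : Int)) →
    drawA n deck (seedN g (52 - n))
      = (List.range' (52 - n) n).map (fun k => slotValue (jsL g) k ((jsL g).getD k 0)) := by
  intro n
  induction n with
  | zero => intro _ _ _ _; rfl
  | succ n ih =>
    intro hn deck hlen hinv
    set t := 52 - (n+1) with hT
    have ht52 : t = 51 - n := by omega
    have htlt : t < 52 := by omega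
    have hnpos : (0:Int) < ((n:Int) + 1) := by positivity
    set jI := PySem.Int.mod (rAt g t) ((n:Int)+1) with hjI
    have hj0 : 0 ≤ jI := by
      rw [hjI, PySem.Int.mod_eq_emod_of_pos hnpos]
      exact Int.emod_nonneg _ (by omega)
    have hjlt : jI < (n:Int) + 1 := by
      rw [hjI, PySem.Int.mod_eq_emod_of_pos hnpos]
      exact Int.emod_lt_of_pos _ hnpos
    have hjn : jI.toNat < n + 1 := by omega
    have hjcast : ((jI.toNat : Nat) : Int) = jI := by omega
    have hjsget : (jsL g).getD t 0 = jI := by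
      rw [jsL_getD g t htlt, hjI]
      congr 1
      omega
    have hjslen : (jsL g).length = 52 := by simp [jsL]
    -- unfold one step of drawA
    rw [drawA, ms_rand_c_seedN]
    have hseedix : t + 1 = 52 - n := by omega
    have hdeck' : ∀ s : Nat, s < 52 →
        (deck.set jI.toNat (deck.getD n 0)).getD s 0 = slotValue (jsL g) (52 - n) (s : Int) := by
      intro s hs
      have hs' : s < deck.length := by omega
      have hstep : slotValue (jsL g) (52 - n) (s : Int)
          = slotValue (jsL g) t (if PySem.List.pyGetD (jsL g) (t : Int) 0 = (s:Int)
              then 51 - (t : Int) else (s:Int)) := by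
        rw [← hseedix]
        rfl
      have hpg : PySem.List.pyGetD (jsL g) (t : Int) 0 = jI := by
        rw [PySem.List.pyGetD_natCast, hjsget]
      rw [hstep, hpg]
      by_cases hsj : s = jI.toNat
      · subst hsj
        rw [if_pos hjcast.symm]
        rw [List.getD_eq_getElem _ 0 (by simp [hs']), List.getElem_set_self]
        have h51 : 51 - (t : Int) = ((n : Nat) : Int) := by omega
        rw [h51, hinv n (by omega)]
      · have hne : (s : Int) ≠ jI := by omega
        rw [if_neg (fun h => hne h.symm)]
        rw [List.getD_eq_getElem _ 0 (by simp [hs']),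
          List.getElem_set_ne (by omega), ← List.getD_eq_getElem deck 0 hs']
        exact hinv s hs
    have hrec := ih (by omega) (deck.set jI.toNat (deck.getD n 0)) (by simp [hlen]) hdeck'
    have hrange : List.range' t (n+1) = t :: List.range' (52 - n) n := by
      rw [List.range'_succ, hseedix]
    dsimp only
    rw [← hjI, hseedix, hrec, hrange, List.map_cons, hjsget,
      hinv jI.toNat (by omega), hjcast]

-- B's placement fold is placeList
lemma placeB (L : List Int) : ∀ (card : List (List Int)) (i : Nat),
    (PySem.List.enumerate L ((i : Nat) : Int)).foldl (fun card iv =>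
        PySem.List.pySetD card (PySem.Int.mod iv.1 8 + 1)
          (PySem.List.pySetD (PySem.List.pyGetD card (PySem.Int.mod iv.1 8 + 1) [])
            (PySem.Int.floordiv iv.1 8) iv.2)) card
      = placeList card i L := by
  induction L with
  | nil => intro card i; simp [PySem.List.enumerate_nil, placeList]
  | cons v L ih =>
    intro card i
    rw [PySem.List.enumerate_cons, List.foldl_cons]
    have hmod : PySem.Int.mod ((i:Nat) : Int) 8 = ((i % 8 : Nat) : Int) := PySem.Int.mod_natCast _ 8
    have hdiv : PySem.Int.floordiv ((i:Nat) : Int) 8 = ((i / 8 : Nat) : Int) := PySem.Int.floordiv_natCast _ 8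
    have hcast : ((i:Nat) : Int) + 1 = ((i + 1 : Nat) : Int) := by omega
    simp only [hmod, hdiv, hcast]
    have hcol : ((i % 8 : Nat) : Int) + 1 = (((i % 8) + 1 : Nat) : Int) := by omega
    rw [hcol]
    simp only [PySem.List.pySetD_natCast, PySem.List.pyGetD_natCast]
    rw [ih]
    rfl

lemma placeB0 (L : List Int) (card : List (List Int)) :
    (PySem.List.enumerate L 0).foldl (fun card iv =>
        PySem.List.pySetD card (PySem.Int.mod iv.1 8 + 1)
          (PySem.List.pySetD (PySem.List.pyGetD card (PySem.Int.mod iv.1 8 + 1) [])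
            (PySem.Int.floordiv iv.1 8) iv.2)) card
      = placeList card 0 L := by
  have h := placeB L card 0
  simpa using h

theorem main_eq (g : Int) : generate_ms_deck_original g = generate_ms_deck_original_alt g := by
  have hlen0 : (PySem.List.pyRange 0 52 1).length = 52 := by
    rw [PySem.List.length_pyRange_one]; rfl
  have hget0 : ∀ s : Nat, s < 52 → (PySem.List.pyRange 0 52 1).getD s 0 = (s : Int) := by
    intro s hs
    rw [List.getD_eq_getElem _ 0 (by omega), PySem.List.getElem_pyRange_one]
    omega
  -- A's side
  have hA := loopA 52 (List.replicate 9 (List.replicate 21 (-1))) (PySem.List.pyRange 0 52 1) g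
    (le_refl _) hlen0
  simp only [Nat.sub_self, Nat.cast_zero, Nat.cast_ofNat] at hA
  -- A's dealt list = slotValue list
  have hDraw := drawA_eq g 52 (le_refl _) (PySem.List.pyRange 0 52 1) hlen0
    (by intro s hs; rw [hget0 s hs]; rfl)
  simp only [Nat.sub_self, seedN] at hDraw
  have hdealt : (PySem.List.pyRange 0 52 1).map
        (fun i => slotValue (jsL g) i.toNat (PySem.List.pyGetD (jsL g) i 0))
      = (List.range' 0 52).map (fun k => slotValue (jsL g) k ((jsL g).getD k 0)) := by
    apply List.ext_getElem
    · simp [hlen0]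
    · intro k h1 h2
      have hk : k < 52 := by simpa [hlen0] using h1
      rw [List.getElem_map, List.getElem_map, PySem.List.getElem_pyRange_one,
        List.getElem_range']
      have h0 : (0:Int) + (k:Int) = ((k:Nat):Int) := by omega
      rw [h0, Int.toNat_natCast, PySem.List.pyGetD_natCast]
      norm_num
  unfold generate_ms_deck_original generate_ms_deck_original_alt
  dsimp only
  rw [hA, hDraw, ms_js_eq, hdealt, placeB0]

-- ===== VERDICT (by name: the statement is the Claim_ definition above) =====
theorem generate_ms_deck_original_spec : Claim_equal_generate_ms_deck_original := by
  intro g _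
  unfold Spec_generate_ms_deck_original
  exact main_eq g
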